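-- pv_equiv track=rewrite | github.com/VincentSch4rf/codefights | largestPlateau/largestPlateau.py | largestPlateau
-- ===== SOURCE A (Python) =====
-- def largestPlateau(m):
--     r = 0
--     q = len(m)
--     if q:
--         p = len(m[0])
--         def f(k,i,j):
--             if 0<=i<q and 0<=j<p and m[i][j]==k:
--                 m[i][j]=-2
--                 return 1 + f(k,i,j+1)+f(k,i-1,j)+f(k,i+1,j)+f(k,i,j-1)
--             return 0
--         for i in range(q):
--             for j in range(p):
--                 k = m[i][j]
--                 if k!=-2:
--                     r = max(r, f(k,i,j))
--     return r
-- ===== SOURCE B (Python) =====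
-- def largestPlateau(m):
--     r = 0
--     q = len(m)
--     if q:
--         p = len(m[0])
--         for i in range(q):
--             for j in range(p):
--                 k = m[i][j]
--                 if k != -2:
--                     c = 0
--                     stack = [(i, j)]
--                     while stack:
--                         x, y = stack.pop()
--                         if 0 <= x < q and 0 <= y < p and m[x][y] == k:
--                             m[x][y] = -2
--                             c += 1
--                             stack.extend([(x, y - 1), (x + 1, y), (x - 1, y), (x, y + 1)])
--                     r = max(r, c)
--     return r
-- ===== Notes on version B (the rewrite author's own statement) =====
-- stated objective: alternative
-- what changed: the recursive 4-way DFS helper f is replaced by an iterative flood fill with an explicit stack (pop a cell, mark it -2 and count it if it still equals k, push its four neighbours), removing recursion entirely; the outer scan and -2 marking are kept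
import Mathlib
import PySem

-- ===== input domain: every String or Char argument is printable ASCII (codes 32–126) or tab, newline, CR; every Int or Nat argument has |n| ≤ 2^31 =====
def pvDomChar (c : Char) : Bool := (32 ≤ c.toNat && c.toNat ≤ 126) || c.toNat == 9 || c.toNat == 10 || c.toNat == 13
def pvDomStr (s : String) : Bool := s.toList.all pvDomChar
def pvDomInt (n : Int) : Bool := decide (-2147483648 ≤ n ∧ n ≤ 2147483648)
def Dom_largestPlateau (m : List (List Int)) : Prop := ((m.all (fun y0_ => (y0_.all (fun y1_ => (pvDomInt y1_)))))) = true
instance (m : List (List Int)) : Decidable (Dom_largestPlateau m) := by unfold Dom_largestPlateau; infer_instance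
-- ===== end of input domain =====

-- B replaces A's recursive 4-way DFS helper by an iterative explicit-stack flood fill (same
-- outer scan, same in-place -2 marking of m, which both Pythons perform); objective: alternative.
-- Both ports thread the mutated grid functionally; fuel is a termination artifact only.

-- ===== PORT A =====
-- m[i][j] read / m[i][j] = v write; used only under the 0<=i<q and 0<=j<p guard, where they
-- are exact (indices nonnegative and in range on every input admitted by Pre_)
def pvGetC (g : List (List Int)) (i j : Int) : Int := (g.getD i.toNat []).getD j.toNat 0
def pvSetC (g : List (List Int)) (i j v : Int) : List (List Int) :=
  g.set i.toNat ((g.getD i.toNat []).set j.toNat v)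

-- A's recursive helper f (the closures q, p become parameters; the mutated m is threaded
-- through; fuel only for termination: each recursive call gets fuel-1, and the top-level
-- fuel q*p+1 exceeds the deepest chain of guard-passing calls, each of which marks a fresh cell)
def fRecF (fuel : Nat) (q p k i j : Int) (g : List (List Int)) : Int × List (List Int) :=
  match fuel with
  | 0 => (0, g)
  | fuel + 1 =>
    if 0 ≤ i ∧ i < q ∧ 0 ≤ j ∧ j < p ∧ pvGetC g i j = k then
      let g1 := pvSetC g i j (-2)
      let o1 := fRecF fuel q p k i (j + 1) g1
      let o2 := fRecF fuel q p k (i - 1) j o1.2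
      let o3 := fRecF fuel q p k (i + 1) j o2.2
      let o4 := fRecF fuel q p k i (j - 1) o3.2
      (1 + o1.1 + o2.1 + o3.1 + o4.1, o4.2)
    else (0, g)

-- A's inner loop: for j in range(p): k = m[i][j]; if k != -2: r = max(r, f(k,i,j))
def colsA (fuel : Nat) (q p i : Int) (js : List Int) (g : List (List Int)) (r : Int) :
    Int × List (List Int) :=
  match js with
  | [] => (r, g)
  | j :: js' =>
    let k := pvGetC g i j
    if k ≠ -2 then
      let o := fRecF fuel q p k i j g
      colsA fuel q p i js' o.2 (max r o.1)
    else colsA fuel q p i js' g r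

-- A's outer loop: for i in range(q)
def rowsA (fuel : Nat) (q p : Int) (is_ : List Int) (g : List (List Int)) (r : Int) :
    Int × List (List Int) :=
  match is_ with
  | [] => (r, g)
  | i :: is' =>
    let o := colsA fuel q p i (PySem.List.pyRange 0 p 1) g r
    rowsA fuel q p is' o.2 o.1

def largestPlateau (m : List (List Int)) : Int :=
  let r : Int := 0
  let q := m.length
  if q ≠ 0 then
    let p := (m.headD []).length
    (rowsA (q * p + 1) (q : Int) (p : Int) (PySem.List.pyRange 0 (q : Int) 1) m r).1
  else r

-- ===== PORT B =====
-- B's while loop over the explicit stack (Python list.pop() = head of this list, so pushed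
-- neighbours are listed last-pushed-first); each pushed entry carries fuel, a termination
-- artifact only (top-level fuel q*p+1 is never exhausted, as for A)
def pvStackM (st : List (Nat × Int × Int)) : Nat := (st.map (fun e => 5 ^ e.1)).sum

def loopB (q p k : Int) (st : List (Nat × Int × Int)) (g : List (List Int)) (c : Int) :
    Int × List (List Int) :=
  match st with
  | [] => (c, g)
  | (fl, x, y) :: rest =>
    match fl with
    | 0 => loopB q p k rest g c
    | fl + 1 =>
      if 0 ≤ x ∧ x < q ∧ 0 ≤ y ∧ y < p ∧ pvGetC g x y = k then
        loopB q p k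
          ((fl, x, y + 1) :: (fl, x - 1, y) :: (fl, x + 1, y) :: (fl, x, y - 1) :: rest)
          (pvSetC g x y (-2)) (c + 1)
      else loopB q p k rest g c
termination_by pvStackM st
decreasing_by
  all_goals simp [pvStackM]
  all_goals
    have h5 : 1 ≤ 5 ^ fl := Nat.one_le_pow _ _ (by omega)
  all_goals
    have _h6 : (5:Nat) ^ (fl + 1) = 5 * 5 ^ fl := by ring
  all_goals omega

-- B's inner loop: k = m[i][j]; if k != -2: c = 0; stack = [(i,j)]; while …; r = max(r, c)
def colsB (fuel : Nat) (q p i : Int) (js : List Int) (g : List (List Int)) (r : Int) :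
    Int × List (List Int) :=
  match js with
  | [] => (r, g)
  | j :: js' =>
    let k := pvGetC g i j
    if k ≠ -2 then
      let o := loopB q p k [(fuel, i, j)] g 0
      colsB fuel q p i js' o.2 (max r o.1)
    else colsB fuel q p i js' g r

def rowsB (fuel : Nat) (q p : Int) (is_ : List Int) (g : List (List Int)) (r : Int) :
    Int × List (List Int) :=
  match is_ with
  | [] => (r, g)
  | i :: is' =>
    let o := colsB fuel q p i (PySem.List.pyRange 0 p 1) g r
    rowsB fuel q p is' o.2 o.1

def largestPlateau_alt (m : List (List Int)) : Int :=
  let r : Int := 0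
  let q := m.length
  if q ≠ 0 then
    let p := (m.headD []).length
    (rowsB (q * p + 1) (q : Int) (p : Int) (PySem.List.pyRange 0 (q : Int) 1) m r).1
  else r

-- ===== PRECONDITION & SPEC =====
-- A raises IndexError exactly when some row is shorter than the first row (its cells are read
-- at every column index below len(m[0])); Pre_ admits every input on which A returns.
def Pre_largestPlateau (m : List (List Int)) : Prop :=
  ∀ row ∈ m, (m.headD []).length ≤ row.length
instance (m : List (List Int)) : Decidable (Pre_largestPlateau m) := by
  unfold Pre_largestPlateau; infer_instance

def pvWitness_largestPlateau : List (List Int) := [[1, 1], [2, 2]]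

def Spec_largestPlateau (m : List (List Int)) (out : Int) : Prop := out = largestPlateau_alt m
instance (m : List (List Int)) (out : Int) : Decidable (Spec_largestPlateau m out) := by
  unfold Spec_largestPlateau; infer_instance

-- ===== CLAIM (what is proved, stated in full; the proofs are below) =====
def Claim_equal_largestPlateau : Prop :=
  ∀ (m : List (List Int)), Dom_largestPlateau m → Pre_largestPlateau m →
    Spec_largestPlateau m (largestPlateau m)

-- ===== LEMMAS AND PROOFS =====
-- Bisimulation: popping one stack entry and running B's loop to completion is the same as
-- running A's recursive f on that cell first (B pushes the four neighbours so that they are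
-- popped in exactly f's call order j+1, i-1, i+1, j-1), for EVERY fuel value.
theorem loopB_fRecF (q p k : Int) :
    ∀ (fl : Nat) (i j : Int) (g : List (List Int)) (rest : List (Nat × Int × Int)) (c : Int),
    loopB q p k ((fl, i, j) :: rest) g c =
      loopB q p k rest (fRecF fl q p k i j g).2 (c + (fRecF fl q p k i j g).1) := by
  intro fl
  induction fl with
  | zero => intro i j g rest c; simp [loopB, fRecF]
  | succ fl ih =>
    intro i j g rest c
    by_cases h : 0 ≤ i ∧ i < q ∧ 0 ≤ j ∧ j < p ∧ pvGetC g i j = k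
    · rw [loopB, fRecF]
      simp only [if_pos h]
      rw [ih, ih, ih, ih]
      ring_nf
    · rw [loopB, fRecF]
      simp [h]

theorem colsAB (fuel : Nat) (q p i : Int) :
    ∀ (js : List Int) (g : List (List Int)) (r : Int),
    colsB fuel q p i js g r = colsA fuel q p i js g r := by
  intro js
  induction js with
  | nil => intro g r; rfl
  | cons j js' ih =>
    intro g r
    rw [colsA, colsB]
    by_cases hk : pvGetC g i j ≠ -2
    · simp only [if_pos hk, loopB_fRecF, loopB, zero_add]
      exact ih _ _
    · simp only [if_neg hk]
      exact ih _ _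

theorem rowsAB (fuel : Nat) (q p : Int) :
    ∀ (is_ : List Int) (g : List (List Int)) (r : Int),
    rowsB fuel q p is_ g r = rowsA fuel q p is_ g r := by
  intro is_
  induction is_ with
  | nil => intro g r; rfl
  | cons i is' ih =>
    intro g r
    rw [rowsA, rowsB, colsAB]
    exact ih _ _

theorem largestPlateau_eq (m : List (List Int)) : largestPlateau m = largestPlateau_alt m := by
  simp only [largestPlateau, largestPlateau_alt, rowsAB]

-- ===== VERDICT (by name: the statement is the Claim_ definition above) =====
theorem largestPlateau_spec : Claim_equal_largestPlateau := by
  intro m _ _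
  exact largestPlateau_eq m
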